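-- pv_equiv track=rewrite | github.com/alam13/GeoProNetUp | train_coor.py | _downstream_subtree
-- ===== SOURCE A (Python) =====
-- def _downstream_subtree(graph, root, blocked):
--     stack = [root]
--     seen = {blocked}
--     out = []
--     while stack:
--         cur = stack.pop()
--         if cur in seen:
--             continue
--         seen.add(cur)
--         out.append(cur)
--         for nei in graph.get(cur, []):
--             if nei not in seen:
--                 stack.append(nei)
--     return out
-- ===== SOURCE B (Python) =====
-- def _downstream_subtree(graph, root, blocked):
--     # Recursive DFS: inner visit() recursion instead of A's explicit while-loop stack;
--     # neighbors visited in reversed order to reproduce the stack's LIFO order.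
--     seen = {blocked}
--     out = []
--     def visit(cur):
--         if cur in seen:
--             return
--         seen.add(cur)
--         out.append(cur)
--         for nei in reversed(graph.get(cur, [])):
--             visit(nei)
--     visit(root)
--     return out
-- ===== Notes on version B (the rewrite author's own statement) =====
-- stated objective: simpler
-- what changed: Replaces A's explicit while-loop over a node stack with push-time seen-filtering by a recursive inner visit() that checks seen at visit time and recurses over the neighbors in reversed order, giving the identical DFS output order.
import Mathlib
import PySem

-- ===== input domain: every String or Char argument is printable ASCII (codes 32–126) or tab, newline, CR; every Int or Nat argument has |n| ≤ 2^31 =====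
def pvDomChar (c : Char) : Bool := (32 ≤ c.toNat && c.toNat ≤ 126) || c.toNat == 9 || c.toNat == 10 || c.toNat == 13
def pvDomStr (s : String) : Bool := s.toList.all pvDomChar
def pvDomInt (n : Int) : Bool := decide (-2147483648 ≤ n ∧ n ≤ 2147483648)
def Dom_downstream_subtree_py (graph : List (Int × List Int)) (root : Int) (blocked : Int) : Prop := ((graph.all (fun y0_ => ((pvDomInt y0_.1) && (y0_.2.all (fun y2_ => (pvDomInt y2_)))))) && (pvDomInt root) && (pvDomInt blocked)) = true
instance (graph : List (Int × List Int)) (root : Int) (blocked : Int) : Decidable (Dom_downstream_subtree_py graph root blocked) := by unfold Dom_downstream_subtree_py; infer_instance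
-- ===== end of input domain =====

-- B replaces A's explicit while-loop over a node stack (push-time seen-filtering)
-- by a recursive visit() that checks `seen` at visit time and recurses over the
-- neighbors in reversed order; same return value.

-- shared helper: graph.get(cur, []) — first match in the association list
def pvNbrs (graph : List (Int × List Int)) (c : Int) : List Int :=
  match graph.find? (fun p => p.1 == c) with
  | some p => p.2
  | none => []

-- fuel bookkeeping (the Python loop/recursion terminates; fuel is a generous
-- upper bound on the number of iterations / recursion depth, proved sufficient below)
def pvDeg (graph : List (Int × List Int)) : Nat := (graph.map (fun p => p.2.length)).sum
def pvUniv (graph : List (Int × List Int)) (root : Int) : List Int :=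
  root :: graph.flatMap (fun p => p.1 :: p.2)
def pvFuelA (graph : List (Int × List Int)) (root : Int) : Nat :=
  (pvUniv graph root).length * (1 + pvDeg graph) + 2

-- ===== PORT A =====
-- A's while-loop: stack of nodes (head = top), neighbors filtered at push time.
def pvLoopA (graph : List (Int × List Int)) : Nat → List Int → PySem.Set Int → List Int → List Int
  | 0, _, _, out => out
  | _ + 1, [], _, out => out
  | f + 1, c :: st, s, out =>
      if PySem.Set.contains s c then pvLoopA graph f st s out
      else pvLoopA graph f
        (((pvNbrs graph c).filter (fun n => !(PySem.Set.contains (PySem.Set.add s c) n))).reverse ++ st)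
        (PySem.Set.add s c) (out ++ [c])

def downstream_subtree_py (graph : List (Int × List Int)) (root : Int) (blocked : Int) : List Int :=
  pvLoopA graph (pvFuelA graph root) [root] (PySem.Set.ofList [blocked]) []

-- ===== PORT B =====
-- B's recursive visit(cur): return if cur seen, else add cur to seen, append to out,
-- recurse on reversed(graph.get(cur, [])); state (seen, out) threaded through a fold.
def pvVisit (graph : List (Int × List Int)) : Nat → PySem.Set Int × List Int → Int → PySem.Set Int × List Int
  | 0, p, _ => p
  | f + 1, p, c =>
      if PySem.Set.contains p.1 c then p
      else (pvNbrs graph c).reverse.foldl (fun q n => pvVisit graph f q n)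
        (PySem.Set.add p.1 c, p.2 ++ [c])

def downstream_subtree_py_alt (graph : List (Int × List Int)) (root : Int) (blocked : Int) : List Int :=
  (pvVisit graph ((pvUniv graph root).length + 1) (PySem.Set.ofList [blocked], []) root).2

-- ===== PRECONDITION & SPEC =====
def Spec_downstream_subtree_py (graph : List (Int × List Int)) (root : Int) (blocked : Int) (out : List Int) : Prop := out = downstream_subtree_py_alt graph root blocked
instance (graph : List (Int × List Int)) (root : Int) (blocked : Int) (out : List Int) : Decidable (Spec_downstream_subtree_py graph root blocked out) := by unfold Spec_downstream_subtree_py; infer_instance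

-- ===== CLAIM (what is proved, stated in full; the proofs are below) =====
def Claim_equal_downstream_subtree_py : Prop := ∀ (graph : List (Int × List Int)) (root : Int) (blocked : Int), Dom_downstream_subtree_py graph root blocked → Spec_downstream_subtree_py graph root blocked (downstream_subtree_py graph root blocked)

-- ===== LEMMAS AND PROOFS =====

-- number of universe nodes not yet seen
def pvMu (U : List Int) (s : PySem.Set Int) : Nat :=
  (U.filter (fun x => !(PySem.Set.contains s x))).length

def pvBoundA (graph : List (Int × List Int)) (U : List Int) (st : List Int) (s : PySem.Set Int) : Nat :=
  st.length + pvMu U s * (1 + pvDeg graph)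

lemma pv_mem_univ_root (graph : List (Int × List Int)) (root : Int) : root ∈ pvUniv graph root := by
  simp [pvUniv]

lemma pvNbrs_subset (graph : List (Int × List Int)) (root c x : Int)
    (hx : x ∈ pvNbrs graph c) : x ∈ pvUniv graph root := by
  unfold pvNbrs at hx
  rcases h : graph.find? (fun p => p.1 == c) with _ | p
  · rw [h] at hx; simp at hx
  · rw [h] at hx
    have hp : p ∈ graph := List.mem_of_find?_eq_some h
    simp only [pvUniv, List.mem_cons, List.mem_flatMap]
    exact Or.inr ⟨p, hp, by simp [hx]⟩

lemma pvNbrs_len (graph : List (Int × List Int)) (c : Int) :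
    (pvNbrs graph c).length ≤ pvDeg graph := by
  unfold pvNbrs pvDeg
  cases h : graph.find? (fun p => p.1 == c) with
  | none => exact Nat.zero_le _
  | some p =>
    have hp : p ∈ graph := List.mem_of_find?_eq_some h
    have hm : p.2.length ∈ graph.map (fun q => q.2.length) := List.mem_map_of_mem hp
    exact List.single_le_sum (by intro x _; omega) _ hm

lemma pv_contains_true (s : PySem.Set Int) (x : Int) (h : x ∈ s) :
    PySem.Set.contains s x = true := (PySem.Set.contains_iff s x).mpr h

lemma pv_contains_of_true (s : PySem.Set Int) (x : Int) (h : PySem.Set.contains s x = true) :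
    x ∈ s := (PySem.Set.contains_iff s x).mp h

lemma pv_contains_false_iff (s : PySem.Set Int) (x : Int) :
    PySem.Set.contains s x = false ↔ x ∉ s := by
  rw [Bool.eq_false_iff, Ne, PySem.Set.contains_iff]

lemma pv_subset_add (s : PySem.Set Int) (c : Int) : s ⊆ PySem.Set.add s c := by
  intro x hx; rw [PySem.Set.mem_add]; exact Or.inl hx

lemma pv_filter_le (U : List Int) (p q : Int → Bool)
    (h : ∀ x ∈ U, q x = true → p x = true) :
    (U.filter q).length ≤ (U.filter p).length := by
  induction U with
  | nil => simp
  | cons u t ih =>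
    have ih' := ih (fun x hx => h x (List.mem_cons_of_mem u hx))
    by_cases hq : q u = true
    · have hp : p u = true := h u (List.mem_cons_self) hq
      simp [hq, hp]; omega
    · by_cases hp : p u = true <;> simp [hq, hp] <;> omega

lemma pv_filter_lt (U : List Int) (p q : Int → Bool) (c : Int)
    (hc : c ∈ U) (hpc : p c = true) (hqc : q c = false)
    (h : ∀ x ∈ U, q x = true → p x = true) :
    (U.filter q).length < (U.filter p).length := by
  induction U with
  | nil => simp at hc
  | cons u t ih =>
    have hle : (t.filter q).length ≤ (t.filter p).length :=
      pv_filter_le t p q (fun x hx => h x (List.mem_cons_of_mem u hx))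
    by_cases huc : u = c
    · subst huc
      simp [hpc, hqc]; omega
    · have hct : c ∈ t := by rcases List.mem_cons.mp hc with h' | h'; exact absurd h'.symm huc; exact h'
      have ih' := ih hct (fun x hx => h x (List.mem_cons_of_mem u hx))
      by_cases hq : q u = true
      · have hp : p u = true := h u (List.mem_cons_self) hq
        simp [hq, hp]; omega
      · by_cases hp : p u = true <;> simp [hq, hp] <;> omega

lemma pvMu_subset (U : List Int) (s t : PySem.Set Int) (h : s ⊆ t) :
    pvMu U t ≤ pvMu U s := by
  apply pv_filter_le
  intro x _ hx
  simp only [Bool.not_eq_true'] at hx ⊢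
  exact (pv_contains_false_iff s x).mpr
    (fun hs => (pv_contains_false_iff t x).mp hx (h hs))

lemma pvMu_add_lt (U : List Int) (s : PySem.Set Int) (c : Int)
    (hcU : c ∈ U) (hcs : c ∉ s) :
    pvMu U (PySem.Set.add s c) < pvMu U s := by
  apply pv_filter_lt U _ _ c hcU
  · simp only [Bool.not_eq_true']
    exact (pv_contains_false_iff s c).mpr hcs
  · have : PySem.Set.contains (PySem.Set.add s c) c = true :=
      pv_contains_true _ c (by rw [PySem.Set.mem_add]; exact Or.inr rfl)
    simp only [this, Bool.not_true]
  · intro x _ hx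
    simp only [Bool.not_eq_true'] at hx ⊢
    exact (pv_contains_false_iff s x).mpr
      (fun hs => (pv_contains_false_iff _ x).mp hx (pv_subset_add s c hs))

lemma pvMu_le_len (U : List Int) (s : PySem.Set Int) : pvMu U s ≤ U.length :=
  List.length_filter_le _ _

lemma pvVisit_seen (graph : List (Int × List Int)) (f : Nat) (s : PySem.Set Int)
    (o : List Int) (c : Int) (h : c ∈ s) :
    pvVisit graph f (s, o) c = (s, o) := by
  cases f with
  | zero => rfl
  | succ f =>
    simp only [pvVisit]
    rw [if_pos (by simpa using pv_contains_true s c h)]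

lemma pvFold_mono_of (graph : List (Int × List Int)) (f : Nat)
    (hv : ∀ (s : PySem.Set Int) (o : List Int) (c : Int), s ⊆ (pvVisit graph f (s, o) c).1) :
    ∀ (l : List Int) (p : PySem.Set Int × List Int), p.1 ⊆ (l.foldl (fun q n => pvVisit graph f q n) p).1 := by
  intro l
  induction l with
  | nil => intro p; simp
  | cons x t ih =>
    intro p
    have h1 : p.1 ⊆ (pvVisit graph f p x).1 := hv p.1 p.2 x
    simp only [List.foldl_cons]
    exact fun y hy => ih (pvVisit graph f p x) (h1 hy)

lemma pvVisit_mono (graph : List (Int × List Int)) :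
    ∀ (f : Nat) (s : PySem.Set Int) (o : List Int) (c : Int), s ⊆ (pvVisit graph f (s, o) c).1 := by
  intro f
  induction f with
  | zero => intro s o c; simp [pvVisit]
  | succ f ih =>
    intro s o c
    by_cases h : c ∈ s
    · rw [pvVisit_seen graph _ s o c h]
      exact fun _ hy => hy
    · have hcs : PySem.Set.contains s c = false := (pv_contains_false_iff s c).mpr h
      have hun : pvVisit graph (f + 1) (s, o) c =
          (pvNbrs graph c).reverse.foldl (fun q n => pvVisit graph f q n)
            (PySem.Set.add s c, o ++ [c]) := by
        simp only [pvVisit]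
        rw [if_neg (fun hcc => h (pv_contains_of_true _ c hcc))]
      rw [hun]
      have := pvFold_mono_of graph f (fun s o c => ih s o c) ((pvNbrs graph c).reverse)
        (PySem.Set.add s c, o ++ [c])
      exact fun y hy => this (pv_subset_add s c hy)

-- fuel irrelevance for fold given fuel irrelevance for visit at a μ-level
lemma pvFirrel_of (graph : List (Int × List Int)) (U : List Int) (m f f' : Nat)
    (hv : ∀ (s : PySem.Set Int) (o : List Int) (c : Int), c ∈ U → pvMu U s ≤ m →
      pvMu U s < f → pvMu U s < f' → pvVisit graph f (s, o) c = pvVisit graph f' (s, o) c) :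
    ∀ (l : List Int) (s : PySem.Set Int) (o : List Int), (∀ x ∈ l, x ∈ U) → pvMu U s ≤ m →
      pvMu U s < f → pvMu U s < f' →
      l.foldl (fun q n => pvVisit graph f q n) (s, o) = l.foldl (fun q n => pvVisit graph f' q n) (s, o) := by
  intro l
  induction l with
  | nil => intro s o _ _ _ _; simp
  | cons x t ih =>
    intro s o hl hm hf hf'
    have hx : x ∈ U := hl x List.mem_cons_self
    have hhead : pvVisit graph f (s, o) x = pvVisit graph f' (s, o) x := hv s o x hx hm hf hf'
    simp only [List.foldl_cons, hhead]
    rcases hp : pvVisit graph f' (s, o) x with ⟨s', o'⟩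
    have hsub : s ⊆ s' := by
      have := pvVisit_mono graph f' s o x
      rw [hp] at this; exact this
    have hmu : pvMu U s' ≤ pvMu U s := pvMu_subset U s s' hsub
    exact ih s' o' (fun y hy => hl y (List.mem_cons_of_mem x hy)) (le_trans hmu hm)
      (lt_of_le_of_lt hmu hf) (lt_of_le_of_lt hmu hf')

lemma pvVirrel (graph : List (Int × List Int)) (U : List Int)
    (hU : ∀ c x, x ∈ pvNbrs graph c → x ∈ U) :
    ∀ (m : Nat) (s : PySem.Set Int) (o : List Int) (c : Int) (f f' : Nat), c ∈ U →
      pvMu U s ≤ m → pvMu U s < f → pvMu U s < f' →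
      pvVisit graph f (s, o) c = pvVisit graph f' (s, o) c := by
  intro m
  induction m with
  | zero =>
    intro s o c f f' hcU hm _ _
    have hc : c ∈ s := by
      by_contra hc
      have h1 : pvMu U s ≠ 0 := by
        unfold pvMu
        have : c ∈ U.filter (fun x => !(PySem.Set.contains s x)) := by
          rw [List.mem_filter]
          refine ⟨hcU, ?_⟩
          simp only [Bool.not_eq_true']
          cases h : PySem.Set.contains s c
          · rfl
          · exact absurd (pv_contains_of_true s c h) hc
        intro hlen
        rw [List.length_eq_zero_iff] at hlen
        rw [hlen] at this; simp at this
      omega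
    rw [pvVisit_seen graph f s o c hc, pvVisit_seen graph f' s o c hc]
  | succ m ih =>
    intro s o c f f' hcU hm hf hf'
    by_cases hc : c ∈ s
    · rw [pvVisit_seen graph f s o c hc, pvVisit_seen graph f' s o c hc]
    · have hcs : PySem.Set.contains s c = false := by
        cases h : PySem.Set.contains s c
        · rfl
        · exact absurd (pv_contains_of_true s c h) hc
      obtain ⟨fa, rfl⟩ : ∃ fa, f = fa + 1 := ⟨f - 1, by omega⟩
      obtain ⟨fb, rfl⟩ : ∃ fb, f' = fb + 1 := ⟨f' - 1, by omega⟩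
      simp only [pvVisit, hcs, Bool.false_eq_true, if_false]
      have hmu' : pvMu U (PySem.Set.add s c) < pvMu U s := pvMu_add_lt U s c hcU hc
      exact pvFirrel_of graph U m fa fb
        (fun s1 o1 c1 hc1 hm1 hfa hfb => ih s1 o1 c1 fa fb hc1 hm1 hfa hfb)
        ((pvNbrs graph c).reverse) (PySem.Set.add s c) (o ++ [c])
        (fun x hx => hU c x (List.mem_reverse.mp hx))
        (by omega) (by omega) (by omega)

lemma pvFirrel (graph : List (Int × List Int)) (U : List Int)
    (hU : ∀ c x, x ∈ pvNbrs graph c → x ∈ U)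
    (l : List Int) (s : PySem.Set Int) (o : List Int) (f f' : Nat)
    (hl : ∀ x ∈ l, x ∈ U) (hf : pvMu U s < f) (hf' : pvMu U s < f') :
    l.foldl (fun q n => pvVisit graph f q n) (s, o) = l.foldl (fun q n => pvVisit graph f' q n) (s, o) :=
  pvFirrel_of graph U (pvMu U s) f f'
    (fun s1 o1 c1 hc1 hm1 hfa hfb => pvVirrel graph U hU (pvMu U s) s1 o1 c1 f f' hc1 hm1 hfa hfb)
    l s o hl (le_refl _) hf hf'

-- folding visit over a list with the already-seen elements filtered out changes nothing
lemma pvFoldFilter (graph : List (Int × List Int)) (fB : Nat) :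
    ∀ (l : List Int) (s0 : PySem.Set Int) (p : PySem.Set Int × List Int), s0 ⊆ p.1 →
      (l.filter (fun x => !(PySem.Set.contains s0 x))).foldl (fun q n => pvVisit graph fB q n) p =
      l.foldl (fun q n => pvVisit graph fB q n) p := by
  intro l
  induction l with
  | nil => intro s0 p _; rfl
  | cons x t ih =>
    intro s0 p hsub
    by_cases hx : x ∈ s0
    · have h1 : PySem.Set.contains s0 x = true := pv_contains_true s0 x hx
      have h2 : pvVisit graph fB p x = p := by
        rcases p with ⟨s, o⟩
        exact pvVisit_seen graph fB s o x (hsub hx)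
      simp only [List.filter_cons, h1, Bool.not_true, Bool.false_eq_true, if_false,
        List.foldl_cons, h2]
      exact ih s0 p hsub
    · have h1 : PySem.Set.contains s0 x = false := (pv_contains_false_iff s0 x).mpr hx
      simp only [List.filter_cons, h1, Bool.not_false, if_true, List.foldl_cons]
      apply ih s0
      rcases p with ⟨s, o⟩
      exact fun y hy => pvVisit_mono graph fB s o x (hsub hy)

-- A's loop equals the fold of B's recursive visitor over the stack
lemma pvMA (graph : List (Int × List Int)) (root : Int) :
    ∀ (m : Nat) (st : List Int) (s : PySem.Set Int) (o : List Int) (fA fB : Nat),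
      pvMu (pvUniv graph root) s ≤ m → (∀ x ∈ st, x ∈ pvUniv graph root) →
      pvMu (pvUniv graph root) s < fB → pvBoundA graph (pvUniv graph root) st s < fA →
      pvLoopA graph fA st s o = (st.foldl (fun q n => pvVisit graph fB q n) (s, o)).2 := by
  intro m
  set U := pvUniv graph root with hUdef
  have hU : ∀ c x, x ∈ pvNbrs graph c → x ∈ U := fun c x hx => pvNbrs_subset graph root c x hx
  induction m with
  | zero =>
    intro st
    induction st with
    | nil =>
      intro s o fA fB _ _ _ hfA
      obtain ⟨f, rfl⟩ : ∃ f, fA = f + 1 := ⟨fA - 1, by omega⟩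
      rfl
    | cons c st' ih =>
      intro s o fA fB hm hst hfB hfA
      obtain ⟨f, rfl⟩ : ∃ f, fA = f + 1 := ⟨fA - 1, by omega⟩
      have hc : c ∈ s := by
        by_contra hc
        have hcU : c ∈ U := hst c List.mem_cons_self
        have : pvMu U s ≠ 0 := by
          unfold pvMu
          have hmem : c ∈ U.filter (fun x => !(PySem.Set.contains s x)) := by
            rw [List.mem_filter]
            refine ⟨hcU, ?_⟩
            simp only [Bool.not_eq_true']
            exact (pv_contains_false_iff s c).mpr hc
          intro hlen
          rw [List.length_eq_zero_iff] at hlen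
          rw [hlen] at hmem; simp at hmem
        omega
      simp only [pvLoopA, pv_contains_true s c hc, if_true, List.foldl_cons,
        pvVisit_seen graph fB s o c hc]
      exact ih s o f fB hm (fun x hx => hst x (List.mem_cons_of_mem c hx)) hfB
        (by unfold pvBoundA at hfA ⊢; simp at hfA ⊢; omega)
  | succ m ihm =>
    intro st
    induction st with
    | nil =>
      intro s o fA fB _ _ _ hfA
      obtain ⟨f, rfl⟩ : ∃ f, fA = f + 1 := ⟨fA - 1, by omega⟩
      rfl
    | cons c st' ih =>
      intro s o fA fB hm hst hfB hfA
      obtain ⟨f, rfl⟩ : ∃ f, fA = f + 1 := ⟨fA - 1, by omega⟩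
      by_cases hc : c ∈ s
      · simp only [pvLoopA, pv_contains_true s c hc, if_true, List.foldl_cons,
          pvVisit_seen graph fB s o c hc]
        exact ih s o f fB hm (fun x hx => hst x (List.mem_cons_of_mem c hx)) hfB
          (by unfold pvBoundA at hfA ⊢; simp at hfA ⊢; omega)
      · have hcs : PySem.Set.contains s c = false := by
          cases h : PySem.Set.contains s c
          · rfl
          · exact absurd (pv_contains_of_true s c h) hc
        have hcU : c ∈ U := hst c List.mem_cons_self
        have hmu' : pvMu U (PySem.Set.add s c) < pvMu U s := pvMu_add_lt U s c hcU hc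
        simp only [pvLoopA, hcs, Bool.false_eq_true, if_false]
        have hlen : ((pvNbrs graph c).filter
            (fun n => !(PySem.Set.contains (PySem.Set.add s c) n))).length ≤ pvDeg graph :=
          le_trans (List.length_filter_le _ _) (pvNbrs_len graph c)
        have harith : pvBoundA graph U
            (((pvNbrs graph c).filter (fun n => !(PySem.Set.contains (PySem.Set.add s c) n))).reverse ++ st')
            (PySem.Set.add s c) < f := by
          unfold pvBoundA at hfA ⊢
          simp only [List.length_append, List.length_reverse, List.length_cons] at hfA ⊢
          have h1 : (pvMu U (PySem.Set.add s c) + 1) * (1 + pvDeg graph) ≤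
              pvMu U s * (1 + pvDeg graph) := Nat.mul_le_mul_right _ (by omega)
          have h2 : (pvMu U (PySem.Set.add s c) + 1) * (1 + pvDeg graph) =
              pvMu U (PySem.Set.add s c) * (1 + pvDeg graph) + (1 + pvDeg graph) := by ring
          omega
        rw [ihm (((pvNbrs graph c).filter (fun n => !(PySem.Set.contains (PySem.Set.add s c) n))).reverse ++ st')
          (PySem.Set.add s c) (o ++ [c]) f fB (by omega)
          (by
            intro x hx
            rcases List.mem_append.mp hx with h | h
            · exact hU c x (List.mem_of_mem_filter (List.mem_reverse.mp h))
            · exact hst x (List.mem_cons_of_mem c h))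
          (by omega) harith]
        obtain ⟨g, rfl⟩ : ∃ g, fB = g + 1 := ⟨fB - 1, by omega⟩
        simp only [List.foldl_cons, List.foldl_append]
        have hvis : pvVisit graph (g + 1) (s, o) c =
            (pvNbrs graph c).reverse.foldl (fun q n => pvVisit graph g q n)
              (PySem.Set.add s c, o ++ [c]) := by
          simp only [pvVisit]
          rw [if_neg (fun hcc => hc (pv_contains_of_true _ c hcc))]
        rw [hvis]
        have hfuel : (pvNbrs graph c).reverse.foldl (fun q n => pvVisit graph g q n)
              (PySem.Set.add s c, o ++ [c]) =
            (pvNbrs graph c).reverse.foldl (fun q n => pvVisit graph (g + 1) q n)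
              (PySem.Set.add s c, o ++ [c]) :=
          pvFirrel graph U hU ((pvNbrs graph c).reverse) (PySem.Set.add s c) (o ++ [c]) g (g + 1)
            (fun x hx => hU c x (List.mem_reverse.mp hx)) (by omega) (by omega)
        rw [hfuel]
        have hfilt : (((pvNbrs graph c).filter
              (fun n => !(PySem.Set.contains (PySem.Set.add s c) n))).reverse).foldl
              (fun q n => pvVisit graph (g + 1) q n) (PySem.Set.add s c, o ++ [c]) =
            (pvNbrs graph c).reverse.foldl (fun q n => pvVisit graph (g + 1) q n)
              (PySem.Set.add s c, o ++ [c]) := by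
          rw [← List.filter_reverse]
          exact pvFoldFilter graph (g + 1) ((pvNbrs graph c).reverse) (PySem.Set.add s c)
            (PySem.Set.add s c, o ++ [c]) (fun y hy => hy)
        rw [hfilt]

-- ===== VERDICT (by name: the statement is the Claim_ definition above) =====
theorem downstream_subtree_py_spec : Claim_equal_downstream_subtree_py := by
  intro graph root blocked _
  unfold Spec_downstream_subtree_py downstream_subtree_py downstream_subtree_py_alt
  have hmu : pvMu (pvUniv graph root) (PySem.Set.ofList [blocked]) ≤ (pvUniv graph root).length :=
    pvMu_le_len _ _
  have hA : pvLoopA graph (pvFuelA graph root) [root] (PySem.Set.ofList [blocked]) [] =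
      ([root].foldl (fun q n => pvVisit graph ((pvUniv graph root).length + 1) q n)
        (PySem.Set.ofList [blocked], [])).2 := by
    apply pvMA graph root (pvMu (pvUniv graph root) (PySem.Set.ofList [blocked])) [root]
      (PySem.Set.ofList [blocked]) [] (pvFuelA graph root) ((pvUniv graph root).length + 1)
      (le_refl _)
    · intro x hx
      rcases List.mem_cons.mp hx with h | h
      · rw [h]; exact pv_mem_univ_root graph root
      · simp at h
    · omega
    · unfold pvBoundA pvFuelA
      simp only [List.length_cons, List.length_nil]
      have : pvMu (pvUniv graph root) (PySem.Set.ofList [blocked]) * (1 + pvDeg graph) ≤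
          (pvUniv graph root).length * (1 + pvDeg graph) := Nat.mul_le_mul_right _ hmu
      omega
  rw [hA]
  simp only [List.foldl_cons, List.foldl_nil]
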